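-- pv_equiv track=rewrite | github.com/Pesteves2002/Advent-of-Code | 2026/day07.py | visit_quantum
-- ===== SOURCE A (Python) =====
-- def visit_quantum(x: int, tachyons: list[list[int]]) -> int:
--     beams = {x: 1}
--
--     for bif in tachyons:
--         next_beams: dict[int, int] = {}
--         for beam, count in beams.items():
--             if beam in bif:
--                 next_beams[beam - 1] = next_beams.get(beam - 1, 0) + count
--                 next_beams[beam + 1] = next_beams.get(beam + 1, 0) + count
--             else:
--                 next_beams[beam] = next_beams.get(beam, 0) + count
--
--         beams = next_beams
--
--     return sum(beams.values())
-- ===== SOURCE B (Python) =====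
-- def visit_quantum(x: int, tachyons: list[list[int]]) -> int:
--     # Recursive formulation: the answer is the number of leaves of the
--     # bifurcation tree rooted at x; no dict of multiplicities is kept.
--     if not tachyons:
--         return 1
--     first, rest = tachyons[0], tachyons[1:]
--     if x in first:
--         return visit_quantum(x - 1, rest) + visit_quantum(x + 1, rest)
--     return visit_quantum(x, rest)
-- ===== Notes on version B (the rewrite author's own statement) =====
-- stated objective: simpler
-- what changed: Replaces the iterative position->count dict simulation with a direct top-down recursion that counts the leaves of the bifurcation tree (split: recurse on x-1 and x+1; else recurse on x).
import Mathlib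
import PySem

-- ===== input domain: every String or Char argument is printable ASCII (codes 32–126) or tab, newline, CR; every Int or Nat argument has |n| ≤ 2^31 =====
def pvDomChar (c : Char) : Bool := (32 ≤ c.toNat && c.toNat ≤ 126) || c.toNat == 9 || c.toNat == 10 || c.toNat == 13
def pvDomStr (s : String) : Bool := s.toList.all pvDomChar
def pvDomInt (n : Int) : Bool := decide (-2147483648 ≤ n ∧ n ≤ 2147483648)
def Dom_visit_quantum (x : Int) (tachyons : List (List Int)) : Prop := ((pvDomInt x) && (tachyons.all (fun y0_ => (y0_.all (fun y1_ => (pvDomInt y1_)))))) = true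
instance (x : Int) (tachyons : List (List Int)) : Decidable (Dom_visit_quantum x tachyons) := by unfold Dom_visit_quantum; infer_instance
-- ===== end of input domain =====

-- B replaces A's iterative position→count dict simulation by a direct top-down
-- recursion counting the leaves of the bifurcation tree (objective: simpler).

-- ===== PORT A =====
-- inner loop body: one beams.items() entry (beam, count) added into next_beams
def vqBody (bf : List Int) (nb : PySem.Dict Int Int) (pc : Int × Int) : PySem.Dict Int Int :=
  if pc.1 ∈ bf then
    let nb1 := nb.insert (pc.1 - 1) (nb.getD (pc.1 - 1) 0 + pc.2)
    nb1.insert (pc.1 + 1) (nb1.getD (pc.1 + 1) 0 + pc.2)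
  else
    nb.insert pc.1 (nb.getD pc.1 0 + pc.2)

-- one 'for bif in tachyons' iteration: beams := next_beams
def vqStep (beams : PySem.Dict Int Int) (bf : List Int) : PySem.Dict Int Int :=
  beams.items.foldl (vqBody bf) PySem.Dict.empty

def visit_quantum (x : Int) (tachyons : List (List Int)) : Int :=
  ((tachyons.foldl vqStep ((PySem.Dict.empty : PySem.Dict Int Int).insert x 1)).values).sum

-- ===== PORT B =====
def visit_quantum_alt (x : Int) (tachyons : List (List Int)) : Int :=
  match tachyons with
  | [] => 1
  | first :: rest =>
    if x ∈ first then visit_quantum_alt (x - 1) rest + visit_quantum_alt (x + 1) rest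
    else visit_quantum_alt x rest

-- ===== PRECONDITION & SPEC =====
def Spec_visit_quantum (x : Int) (tachyons : List (List Int)) (out : Int) : Prop := out = visit_quantum_alt x tachyons
instance (x : Int) (tachyons : List (List Int)) (out : Int) : Decidable (Spec_visit_quantum x tachyons out) := by unfold Spec_visit_quantum; infer_instance

-- ===== CLAIM (what is proved, stated in full; the proofs are below) =====
def Claim_equal_visit_quantum : Prop := ∀ (x : Int) (tachyons : List (List Int)), Dom_visit_quantum x tachyons → Spec_visit_quantum x tachyons (visit_quantum x tachyons)

-- ===== LEMMAS AND PROOFS =====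

-- weighted sum of an items list: Σ count · (beams of alt from that position)
def wsum (ts : List (List Int)) (l : List (Int × Int)) : Int :=
  (l.map (fun pc => pc.2 * visit_quantum_alt pc.1 ts)).sum

theorem wsum_nil (ts : List (List Int)) : wsum ts [] = 0 := rfl

theorem wsum_empty_items (ts : List (List Int)) :
    wsum ts (PySem.Dict.empty : PySem.Dict Int Int).items = 0 := rfl

theorem wsum_cons (ts : List (List Int)) (p : Int × Int) (l : List (Int × Int)) :
    wsum ts (p :: l) = p.2 * visit_quantum_alt p.1 ts + wsum ts l := by
  simp [wsum]

theorem wsum_append (ts : List (List Int)) (l l' : List (Int × Int)) :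
    wsum ts (l ++ l') = wsum ts l + wsum ts l' := by
  simp [wsum]

-- a key-replacement map is the identity when the key is absent
theorem replace_map_id (k w : Int) :
    ∀ (l : List (Int × Int)), k ∉ l.map Prod.fst →
    l.map (fun p => if p.1 == k then (k, w) else p) = l := by
  intro l
  induction l with
  | nil => intro _; rfl
  | cons p tl ih =>
    intro h
    simp only [List.map_cons, List.mem_cons, not_or] at h
    have hpk : (p.1 == k) = false := by
      simp only [beq_eq_false_iff_ne, ne_eq]
      exact fun he => h.1 he.symm
    simp only [List.map_cons, hpk, Bool.false_eq_true, if_false, List.cons.injEq]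
    exact ⟨trivial, ih h.2⟩

-- replacing the unique entry at key k by (k, w) in a nodup-keys pair list
theorem wsum_replace (ts : List (List Int)) (k old w : Int) :
    ∀ (l : List (Int × Int)), (l.map Prod.fst).Nodup → (k, old) ∈ l →
    wsum ts (l.map (fun p => if p.1 == k then (k, w) else p))
      = wsum ts l - old * visit_quantum_alt k ts + w * visit_quantum_alt k ts := by
  intro l
  induction l with
  | nil => intro _ h; simp at h
  | cons p tl ih =>
    intro hnd hmem
    simp only [List.map_cons, List.nodup_cons] at hnd
    by_cases hk : p.1 = k
    · have hpm : p = (k, old) := by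
        rcases List.mem_cons.1 hmem with h | h
        · exact h.symm
        · exact absurd (hk ▸ (List.mem_map.2 ⟨(k, old), h, rfl⟩)) hnd.1
      have htl : tl.map (fun p => if p.1 == k then (k, w) else p) = tl :=
        replace_map_id k w tl (hk ▸ hnd.1)
      simp only [List.map_cons, hk, beq_self_eq_true, if_true, htl]
      rw [wsum_cons, wsum_cons, hpm]
      ring
    · have hpk : (p.1 == k) = false := by simp [hk]
      have hmem' : (k, old) ∈ tl := by
        rcases List.mem_cons.1 hmem with h | h
        · exact absurd (by rw [← h]) hk
        · exact h
      simp only [List.map_cons, hpk, Bool.false_eq_true, if_false]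
      rw [wsum_cons, wsum_cons, ih hnd.2 hmem']
      ring

-- the single dict-update pattern 'd[k] = d.get(k, 0) + v' adds v·alt(k) to wsum
theorem wsum_insert_add (ts : List (List Int)) (d : PySem.Dict Int Int)
    (hnd : d.keys.Nodup) (k v : Int) :
    wsum ts (d.insert k (d.getD k 0 + v)).items
      = wsum ts d.items + v * visit_quantum_alt k ts := by
  by_cases hc : d.contains k = true
  · obtain ⟨old, hold⟩ : ∃ old, d.get? k = some old := by
      rcases h : d.get? k with _ | old
      · rw [PySem.Dict.get?_eq_none_iff_contains] at h
        simp [h] at hc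
      · exact ⟨old, rfl⟩
    have hitems := PySem.Dict.items_insert_of_contains d (d.getD k 0 + v) hc
    have hmem : (k, old) ∈ d.items := PySem.Dict.mem_items_of_get?_eq_some d hold
    have hgd : d.getD k 0 = old := PySem.Dict.getD_of_get?_eq_some d 0 hold
    rw [hitems, wsum_replace ts k old (d.getD k 0 + v) d.items hnd hmem, hgd]
    ring
  · have hc' : d.contains k = false := by simpa using hc
    rw [PySem.Dict.items_insert_of_not_contains d _ hc',
        PySem.Dict.getD_of_not_contains d _ hc', wsum_append, wsum_cons, wsum_nil]
    ring

theorem nodup_keys_vqBody (bf : List Int) (nb : PySem.Dict Int Int)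
    (h : nb.keys.Nodup) (pc : Int × Int) : (vqBody bf nb pc).keys.Nodup := by
  unfold vqBody
  split
  · exact PySem.Dict.nodup_keys_insert _ _ _ (PySem.Dict.nodup_keys_insert _ _ _ h)
  · exact PySem.Dict.nodup_keys_insert _ _ _ h

-- the inner 'for beam, count in beams.items()' loop, generalized
theorem wsum_inner (ts : List (List Int)) (bf : List Int) :
    ∀ (l : List (Int × Int)) (nb : PySem.Dict Int Int), nb.keys.Nodup →
    wsum ts (l.foldl (vqBody bf) nb).items
      = wsum ts nb.items + wsum (bf :: ts) l := by
  intro l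
  induction l with
  | nil => intro nb _; simp [wsum_nil]
  | cons pc tl ih =>
    intro nb hnd
    rw [List.foldl_cons, ih (vqBody bf nb pc) (nodup_keys_vqBody bf nb hnd pc),
        wsum_cons]
    have hstep : wsum ts (vqBody bf nb pc).items
        = wsum ts nb.items + pc.2 * visit_quantum_alt pc.1 (bf :: ts) := by
      unfold vqBody
      by_cases hm : pc.1 ∈ bf
      · simp only [hm, if_true]
        rw [wsum_insert_add ts _ (PySem.Dict.nodup_keys_insert _ _ _ hnd),
            wsum_insert_add ts nb hnd]
        have : visit_quantum_alt pc.1 (bf :: ts)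
            = visit_quantum_alt (pc.1 - 1) ts + visit_quantum_alt (pc.1 + 1) ts := by
          simp [visit_quantum_alt, hm]
        rw [this]; ring
      · simp only [hm, if_false]
        rw [wsum_insert_add ts nb hnd]
        have : visit_quantum_alt pc.1 (bf :: ts) = visit_quantum_alt pc.1 ts := by
          simp [visit_quantum_alt, hm]
        rw [this]
    rw [hstep]; ring

theorem nodup_keys_vqStep (beams : PySem.Dict Int Int) (bf : List Int) :
    (vqStep beams bf).keys.Nodup := by
  unfold vqStep
  generalize beams.items = l
  induction l using List.reverseRecOn with
  | nil => exact PySem.Dict.nodup_keys_empty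
  | append_singleton tl pc ih =>
    rw [List.foldl_append, List.foldl_cons, List.foldl_nil]
    exact nodup_keys_vqBody bf _ ih pc

-- the outer loop: values-sum of the final dict = wsum of the start dict
theorem wsum_outer :
    ∀ (ts : List (List Int)) (d : PySem.Dict Int Int), d.keys.Nodup →
    ((ts.foldl vqStep d).values).sum = wsum ts d.items := by
  intro ts
  induction ts with
  | nil =>
    intro d _
    simp only [List.foldl_nil, PySem.Dict.values, wsum, visit_quantum_alt]
    simp
  | cons bf tl ih =>
    intro d hnd
    rw [List.foldl_cons, ih (vqStep d bf) (nodup_keys_vqStep d bf)]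
    show wsum tl (d.items.foldl (vqBody bf) PySem.Dict.empty).items = _
    rw [wsum_inner tl bf d.items PySem.Dict.empty PySem.Dict.nodup_keys_empty,
        wsum_empty_items, zero_add]

-- ===== VERDICT (by name: the statement is the Claim_ definition above) =====
theorem visit_quantum_spec : Claim_equal_visit_quantum := by
  intro x ts _
  show visit_quantum x ts = visit_quantum_alt x ts
  unfold visit_quantum
  rw [wsum_outer ts _ (PySem.Dict.nodup_keys_insert _ _ _ PySem.Dict.nodup_keys_empty)]
  rw [PySem.Dict.items_insert_of_not_contains _ _ (by simp [PySem.Dict.contains_empty])]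
  show wsum ts ((PySem.Dict.empty : PySem.Dict Int Int).items ++ [(x, 1)]) = _
  rw [wsum_append, wsum_empty_items, wsum_cons, wsum_nil]
  ring
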